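-- pv_equiv track=rewrite | github.com/ameyavetri/ameya-aws-genai-chatbot | lib/model-interfaces/langchain/functions/request-handler/index.py | _format_context_block
-- ===== SOURCE A (Python) =====
-- def _format_context_block(title: str, items: list) -> str:
--     """
--     items: list of dicts like { "title": "...", "url": "...", "snippet": "..." }
--     """
--     if not items:
--         return ""
--     lines = [f"## {title}"]
--     for i, it in enumerate(items, start=1):
--         t = (it.get("title") or "").strip()
--         u = (it.get("url") or "").strip()
--         s = (it.get("snippet") or "").strip()
--         lines.append(f"[{i}] {t}".strip())
--         if u:
--             lines.append(f"URL: {u}")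
--         if s:
--             lines.append(f"Notes: {s}")
--         lines.append("")  # blank line
--     return "\n".join(lines).strip()
-- ===== SOURCE B (Python) =====
-- def _format_context_block(title: str, items: list) -> str:
--     def go(i, rest):
--         if not rest:
--             return ""
--         it = rest[0]
--         t = (it.get("title") or "").strip()
--         u = (it.get("url") or "").strip()
--         s = (it.get("snippet") or "").strip()
--         block = f"[{i}] {t}".strip()
--         if u:
--             block += f"\nURL: {u}"
--         if s:
--             block += f"\nNotes: {s}"
--         tail = go(i + 1, rest[1:])
--         return block if not tail else block + "\n\n" + tail
--
--     if not items:
--         return ""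
--     return f"## {title}\n" + go(1, items)
-- ===== Notes on version B (the rewrite author's own statement) =====
-- stated objective: simpler
-- what changed: B replaces A's flat line-list with blank-line sentinels and a final whole-string strip by a structural recursion over the items that builds each item's block by direct string concatenation and glues blocks with '\n\n' under the '## title' header; no intermediate list or join is used.
import Mathlib
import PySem

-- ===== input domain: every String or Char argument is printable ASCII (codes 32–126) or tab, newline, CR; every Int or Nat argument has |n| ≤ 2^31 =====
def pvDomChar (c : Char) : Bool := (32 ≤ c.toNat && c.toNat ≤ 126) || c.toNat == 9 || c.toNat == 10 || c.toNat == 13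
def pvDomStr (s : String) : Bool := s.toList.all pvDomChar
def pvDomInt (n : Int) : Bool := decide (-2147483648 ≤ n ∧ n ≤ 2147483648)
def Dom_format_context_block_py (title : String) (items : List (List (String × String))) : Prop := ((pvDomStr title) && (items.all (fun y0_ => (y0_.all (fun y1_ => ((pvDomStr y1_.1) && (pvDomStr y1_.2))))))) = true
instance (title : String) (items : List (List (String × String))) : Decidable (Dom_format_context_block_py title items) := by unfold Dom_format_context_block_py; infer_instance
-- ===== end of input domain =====

-- B replaces A's flat line list with blank-line sentinels and a final whole-string strip
-- by a structural recursion that builds each item's block via direct string concatenation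
-- and glues blocks with "\n\n" under the "## title\n" header (objective: simpler).


-- ===== PORT A =====
-- dicts are association lists; it.get(k) = first match = List.lookup
def format_context_block_py (title : String) (items : List (List (String × String))) : String :=
  if items = [] then ""
  else
    let lines : List String :=
      (PySem.List.enumerate items 1).foldl (fun lines pr =>
        let t := PySem.Str.strip ((List.lookup "title" pr.2).getD "")
        let u := PySem.Str.strip ((List.lookup "url" pr.2).getD "")
        let s := PySem.Str.strip ((List.lookup "snippet" pr.2).getD "")
        let lines := lines ++ [PySem.Str.strip ("[" ++ PySem.Int.toStr pr.1 ++ "] " ++ t)]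
        let lines := if u ≠ "" then lines ++ ["URL: " ++ u] else lines
        let lines := if s ≠ "" then lines ++ ["Notes: " ++ s] else lines
        lines ++ [""])
        ["## " ++ title]
    PySem.Str.strip (PySem.Str.join "\n" lines)

-- ===== PORT B =====
-- B's recursive helper: builds each item's block by direct string concatenation,
-- glues blocks with "\n\n"; rest[1:] becomes the structural tail of the recursion.
def pvGo (i : Int) (rest : List (List (String × String))) : String :=
  match rest with
  | [] => ""
  | it :: rs =>
    let t := PySem.Str.strip ((List.lookup "title" it).getD "")
    let u := PySem.Str.strip ((List.lookup "url" it).getD "")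
    let s := PySem.Str.strip ((List.lookup "snippet" it).getD "")
    let block := PySem.Str.strip ("[" ++ PySem.Int.toStr i ++ "] " ++ t)
    let block := if u ≠ "" then block ++ "\nURL: " ++ u else block
    let block := if s ≠ "" then block ++ "\nNotes: " ++ s else block
    let tail := pvGo (i + 1) rs
    if tail = "" then block else block ++ "\n\n" ++ tail

def format_context_block_py_alt (title : String) (items : List (List (String × String))) : String :=
  if items = [] then ""
  else "## " ++ title ++ "\n" ++ pvGo 1 items

-- ===== PRECONDITION & SPEC =====
def Spec_format_context_block_py (title : String) (items : List (List (String × String))) (out : String) : Prop := out = format_context_block_py_alt title items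
instance (title : String) (items : List (List (String × String))) (out : String) : Decidable (Spec_format_context_block_py title items out) := by unfold Spec_format_context_block_py; infer_instance

-- ===== CLAIM (what is proved, stated in full; the proofs are below) =====
def Claim_equal_format_context_block_py : Prop := ∀ (title : String) (items : List (List (String × String))), Dom_format_context_block_py title items → Spec_format_context_block_py title items (format_context_block_py title items)

-- ===== LEMMAS AND PROOFS =====

/-- The per-item lines that both programs compute. -/
def pvPart (pr : Int × List (String × String)) : List String :=
  let t := PySem.Str.strip ((List.lookup "title" pr.2).getD "")
  let u := PySem.Str.strip ((List.lookup "url" pr.2).getD "")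
  let s := PySem.Str.strip ((List.lookup "snippet" pr.2).getD "")
  let part := [PySem.Str.strip ("[" ++ PySem.Int.toStr pr.1 ++ "] " ++ t)]
  let part := if u ≠ "" then part ++ ["URL: " ++ u] else part
  if s ≠ "" then part ++ ["Notes: " ++ s] else part

theorem pvFoldA (e : List (Int × List (String × String))) (acc : List String) :
    e.foldl (fun lines pr =>
        let t := PySem.Str.strip ((List.lookup "title" pr.2).getD "")
        let u := PySem.Str.strip ((List.lookup "url" pr.2).getD "")
        let s := PySem.Str.strip ((List.lookup "snippet" pr.2).getD "")
        let lines := lines ++ [PySem.Str.strip ("[" ++ PySem.Int.toStr pr.1 ++ "] " ++ t)]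
        let lines := if u ≠ "" then lines ++ ["URL: " ++ u] else lines
        let lines := if s ≠ "" then lines ++ ["Notes: " ++ s] else lines
        lines ++ [""]) acc
    = acc ++ e.flatMap (fun pr => pvPart pr ++ [""]) := by
  have hf : (fun (lines : List String) (pr : Int × List (String × String)) =>
        let t := PySem.Str.strip ((List.lookup "title" pr.2).getD "")
        let u := PySem.Str.strip ((List.lookup "url" pr.2).getD "")
        let s := PySem.Str.strip ((List.lookup "snippet" pr.2).getD "")
        let lines := lines ++ [PySem.Str.strip ("[" ++ PySem.Int.toStr pr.1 ++ "] " ++ t)]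
        let lines := if u ≠ "" then lines ++ ["URL: " ++ u] else lines
        let lines := if s ≠ "" then lines ++ ["Notes: " ++ s] else lines
        lines ++ [""])
      = fun lines pr => lines ++ (pvPart pr ++ [""]) := by
    funext acc pr
    simp only [pvPart]
    split_ifs <;> simp
  rw [hf]
  exact PySem.List.foldl_append_eq_flatMap _ _ _

/-- A line is "clean": nonempty and right-strip leaves it unchanged. -/
def pvClean (l : List Char) : Prop := l ≠ [] ∧ PySem.Chars.rstrip l = l

theorem pvDropWhile_idem {α : Type} (p : α → Bool) (l : List α) :
    List.dropWhile p (List.dropWhile p l) = List.dropWhile p l := by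
  induction l with
  | nil => simp
  | cons a l ih =>
    by_cases h : p a = true
    · simpa [List.dropWhile_cons, h] using ih
    · simp [h]

theorem pvRstrip_idem (l : List Char) : PySem.Chars.rstrip (PySem.Chars.rstrip l) = PySem.Chars.rstrip l := by
  simp [PySem.Chars.rstrip, pvDropWhile_idem]

theorem pvRstrip_cons (c : Char) (r : List Char) (h : PySem.Chars.isspace c = false) :
    PySem.Chars.rstrip (c :: r) = c :: PySem.Chars.rstrip r := by
  simp only [PySem.Chars.rstrip, List.reverse_cons, List.dropWhile_append]
  by_cases he : (List.dropWhile PySem.Chars.isspace r.reverse).isEmpty = true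
  · simp [h, List.isEmpty_iff.mp he]
  · simp [he]

theorem pvRstrip_append_clean (a u : List Char) (h : pvClean u) :
    PySem.Chars.rstrip (a ++ u) = a ++ u := by
  obtain ⟨hne, hfix⟩ := h
  simp only [PySem.Chars.rstrip] at hfix ⊢
  have hrev : List.dropWhile PySem.Chars.isspace u.reverse = u.reverse := by
    have := congrArg List.reverse hfix; simpa using this
  obtain ⟨c, t, hct⟩ : ∃ c t, u.reverse = c :: t := by
    cases hu : u.reverse with
    | nil => exact absurd (by simpa using congrArg List.reverse hu) hne
    | cons c t => exact ⟨c, t, rfl⟩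
  have hc : PySem.Chars.isspace c = false := by
    rw [hct] at hrev
    by_contra hcc
    have hcc' : PySem.Chars.isspace c = true := by simpa using hcc
    rw [List.dropWhile_cons, hcc'] at hrev
    rw [if_pos rfl] at hrev
    have h1 : (List.dropWhile PySem.Chars.isspace t).length ≤ t.length := List.length_dropWhile_le _ _
    rw [hrev] at h1; simp at h1
  have hu' : u = t.reverse ++ [c] := by simpa using congrArg List.reverse hct
  rw [List.reverse_append, hct, List.cons_append, List.dropWhile_cons, hc]
  simp [hu']

theorem pvClean_strip (c : Char) (r : List Char) (h : PySem.Chars.isspace c = false) :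
    pvClean (PySem.Chars.strip (c :: r)) := by
  have hl : PySem.Chars.lstrip (c :: r) = c :: r := by simp [PySem.Chars.lstrip, h]
  constructor
  · simp [PySem.Chars.strip, hl, pvRstrip_cons c r h]
  · simp [PySem.Chars.strip, hl, pvRstrip_cons c r h, pvRstrip_idem, pvRstrip_cons c (PySem.Chars.rstrip r) h]

theorem pvClean_stripStr (s : String) (h : PySem.Str.strip s ≠ "") : pvClean (PySem.Str.strip s).toList := by
  constructor
  · simpa using fun hh => h (String.toList_inj.mp (by simpa using hh))
  · rw [PySem.Str.toList_strip]
    simp [PySem.Chars.strip, pvRstrip_idem]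

/-- Every line of a part is clean, and a part is nonempty. -/
theorem pvPart_nonempty (pr : Int × List (String × String)) : pvPart pr ≠ [] := by
  simp only [pvPart]
  split_ifs <;> simp

theorem pvClean_label (a u : String) (hu : pvClean u.toList) : pvClean (a ++ u).toList := by
  constructor
  · simp only [String.toList_append]
    intro h
    exact hu.1 (by simpa using congrArg (List.drop a.toList.length) h)
  · simp only [String.toList_append]
    exact pvRstrip_append_clean _ _ hu

theorem pvClean_line1 (i : Int) (t : String) :
    pvClean (PySem.Str.strip ("[" ++ PySem.Int.toStr i ++ "] " ++ t)).toList := by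
  have h : (PySem.Str.strip ("[" ++ PySem.Int.toStr i ++ "] " ++ t)).toList
      = PySem.Chars.strip ('[' :: ((PySem.Int.toStr i).toList ++ "] ".toList ++ t.toList)) := by
    rw [PySem.Str.toList_strip]
    simp [String.toList_append]
  rw [h]
  exact pvClean_strip _ _ (by decide)

theorem pvPart_clean (pr : Int × List (String × String)) :
    ∀ l ∈ pvPart pr, pvClean l.toList := by
  intro l hl
  simp only [pvPart] at hl
  split_ifs at hl with h1 h2 h3
  · simp only [List.cons_append, List.nil_append, List.mem_cons,
      List.not_mem_nil, or_false] at hl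
    rcases hl with rfl | rfl | rfl
    · exact pvClean_line1 _ _
    · exact pvClean_label _ _ (pvClean_stripStr _ h2)
    · exact pvClean_label _ _ (pvClean_stripStr _ h1)
  · simp only [List.cons_append, List.nil_append, List.mem_cons,
      List.not_mem_nil, or_false] at hl
    rcases hl with rfl | rfl
    · exact pvClean_line1 _ _
    · exact pvClean_label _ _ (pvClean_stripStr _ h1)
  · simp only [List.cons_append, List.nil_append, List.mem_cons,
      List.not_mem_nil, or_false] at hl
    rcases hl with rfl | rfl
    · exact pvClean_line1 _ _
    · exact pvClean_label _ _ (pvClean_stripStr _ h3)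
  · simp only [List.mem_cons, List.not_mem_nil, or_false] at hl
    subst hl
    exact pvClean_line1 _ _

/-- join of clean pieces is clean. -/
theorem pvClean_join (sep : List Char) (p : List (List Char)) (hne : p ≠ []) (hc : ∀ l ∈ p, pvClean l) :
    pvClean (PySem.Chars.join sep p) := by
  induction p with
  | nil => exact absurd rfl hne
  | cons l rest ih =>
    cases rest with
    | nil => simpa [PySem.Chars.join_singleton] using hc l (by simp)
    | cons l2 rest2 =>
      rw [PySem.Chars.join_cons_cons]
      have hrest := ih (by simp) (fun x hx => hc x (by simp [hx]))
      constructor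
      · simp [hrest.1]
      · exact pvRstrip_append_clean _ _ hrest

theorem pvJoin_append (sep : List Char) (xs ys : List (List Char)) (hx : xs ≠ []) (hy : ys ≠ []) :
    PySem.Chars.join sep (xs ++ ys) = PySem.Chars.join sep xs ++ sep ++ PySem.Chars.join sep ys := by
  induction xs with
  | nil => exact absurd rfl hx
  | cons x xs ih =>
    cases xs with
    | nil =>
      cases ys with
      | nil => exact absurd rfl hy
      | cons y ys' => simp [PySem.Chars.join_cons_cons, PySem.Chars.join_singleton]
    | cons x2 xs2 =>
      have h1 : (x :: x2 :: xs2) ++ ys = x :: x2 :: (xs2 ++ ys) := by simp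
      have h2 : x2 :: (xs2 ++ ys) = (x2 :: xs2) ++ ys := by simp
      rw [h1, PySem.Chars.join_cons_cons, h2, ih (by simp), PySem.Chars.join_cons_cons]
      simp [List.append_assoc]

theorem pvJoin_concat_nil (sep : List Char) (p : List (List Char)) (hp : p ≠ []) :
    PySem.Chars.join sep (p ++ [[]]) = PySem.Chars.join sep p ++ sep := by
  rw [pvJoin_append sep p [[]] hp (by simp), PySem.Chars.join_singleton]
  simp

theorem pvJoin_flatten (ps : List (List (List Char))) (hne : ps ≠ [])
    (h : ∀ p ∈ ps, p ≠ [] ∧ ∀ l ∈ p, pvClean l) :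
    PySem.Chars.join ['\n'] (ps.flatMap (fun p => p ++ [[]]))
      = PySem.Chars.join ['\n', '\n'] (ps.map (PySem.Chars.join ['\n'])) ++ ['\n'] := by
  induction ps with
  | nil => exact absurd rfl hne
  | cons p ps' ih =>
    have hp := h p (by simp)
    cases ps' with
    | nil =>
      simp only [List.flatMap_cons, List.flatMap_nil, List.append_nil, List.map_cons,
        List.map_nil, PySem.Chars.join_singleton]
      exact pvJoin_concat_nil _ p hp.1
    | cons q r =>
      have hrest : ∀ p' ∈ q :: r, p' ≠ [] ∧ ∀ l ∈ p', pvClean l :=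
        fun p' hp' => h p' (by simp [hp'])
      have hfne : (q :: r).flatMap (fun p => p ++ [[]]) ≠ [] := by
        simp only [List.flatMap_cons]
        intro hcon
        exact (hrest q (by simp)).1 (by simpa using congrArg (List.take q.length) hcon)
      have hsplit : (p :: q :: r).flatMap (fun p => p ++ [[]])
          = (p ++ [[]]) ++ (q :: r).flatMap (fun p => p ++ [[]]) := by
        simp [List.flatMap_cons]
      rw [hsplit, pvJoin_append _ _ _ (by simp) hfne, pvJoin_concat_nil _ p hp.1,
        ih (by simp) hrest]
      simp only [List.map_cons]
      rw [PySem.Chars.join_cons_cons]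
      simp [List.append_assoc]

theorem pvLitN : ("\n" : String).toList = ['\n'] := by rfl
theorem pvLitNN : ("\n\n" : String).toList = ['\n', '\n'] := by rfl
theorem pvLitE : ("" : String).toList = [] := by rfl
theorem pvLitH : ("## " : String).toList = ['#', '#', ' '] := by rfl

theorem pvRstrip_concat_space (x : List Char) (c : Char) (h : PySem.Chars.isspace c = true) :
    PySem.Chars.rstrip (x ++ [c]) = PySem.Chars.rstrip x := by
  simp [PySem.Chars.rstrip, List.reverse_append, h]

theorem pvJoin_cons_ne (sep : List Char) (x : List Char) (ys : List (List Char)) (hy : ys ≠ []) :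
    PySem.Chars.join sep (x :: ys) = x ++ sep ++ PySem.Chars.join sep ys := by
  cases ys with
  | nil => exact absurd rfl hy
  | cons y ys' => exact PySem.Chars.join_cons_cons sep x y ys'

def pvBlockF (i : Int) (it : List (String × String)) : String :=
  let t := PySem.Str.strip ((List.lookup "title" it).getD "")
  let u := PySem.Str.strip ((List.lookup "url" it).getD "")
  let s := PySem.Str.strip ((List.lookup "snippet" it).getD "")
  let block := PySem.Str.strip ("[" ++ PySem.Int.toStr i ++ "] " ++ t)
  let block := if u ≠ "" then block ++ "\nURL: " ++ u else block
  if s ≠ "" then block ++ "\nNotes: " ++ s else block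

theorem pvGo_cons (i : Int) (it : List (String × String)) (rs : List (List (String × String))) :
    pvGo i (it :: rs)
      = if pvGo (i + 1) rs = "" then pvBlockF i it
        else pvBlockF i it ++ "\n\n" ++ pvGo (i + 1) rs := rfl

theorem pvBlock_eq (i : Int) (it : List (String × String)) :
    (pvBlockF i it).toList = PySem.Chars.join ['\n'] ((pvPart (i, it)).map String.toList) := by
  simp only [pvBlockF, pvPart]
  split_ifs <;>
    simp [PySem.Chars.join_singleton, PySem.Chars.join_cons_cons, String.toList_append]

theorem pvBlockF_toList_ne (i : Int) (it : List (String × String)) :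
    (pvBlockF i it).toList ≠ [] := by
  rw [pvBlock_eq]
  refine (pvClean_join ['\n'] _ (by simp [pvPart_nonempty]) ?_).1
  intro l hl
  obtain ⟨x, hx, rfl⟩ := List.mem_map.mp hl
  exact pvPart_clean _ x hx

theorem pvGo_ne (i : Int) (rest : List (List (String × String))) (h : rest ≠ []) :
    pvGo i rest ≠ "" := by
  cases rest with
  | nil => exact absurd rfl h
  | cons it rs =>
    rw [pvGo_cons]
    split_ifs with ht
    · intro hcon
      exact pvBlockF_toList_ne i it (by simpa using congrArg String.toList hcon)
    · intro hcon
      have h0 := congrArg String.toList hcon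
      simp only [String.toList_append, pvLitE, List.append_eq_nil_iff] at h0
      exact pvBlockF_toList_ne i it h0.1.1

theorem pvGo_eq (rest : List (List (String × String))) (i : Int) :
    (pvGo i rest).toList
    = PySem.Chars.join ['\n', '\n'] ((PySem.List.enumerate rest i).map
        (fun pr => PySem.Chars.join ['\n'] ((pvPart pr).map String.toList))) := by
  induction rest generalizing i with
  | nil => simp [pvGo, PySem.List.enumerate_nil, PySem.Chars.join_nil]
  | cons it rs ih =>
    rw [PySem.List.enumerate_cons, pvGo_cons]
    cases rs with
    | nil =>
      rw [if_pos (show pvGo (i + 1) [] = "" from rfl), PySem.List.enumerate_nil]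
      simp only [List.map_cons, List.map_nil, PySem.Chars.join_singleton]
      exact pvBlock_eq i it
    | cons r rs' =>
      have htail : pvGo (i + 1) (r :: rs') ≠ "" := pvGo_ne _ _ (by simp)
      have hene : PySem.List.enumerate (r :: rs') (i + 1) ≠ [] := by
        intro hcon
        have := PySem.List.length_enumerate (r :: rs') (i + 1)
        rw [hcon] at this; simp at this
      have hmapne : (PySem.List.enumerate (r :: rs') (i + 1)).map
          (fun pr => PySem.Chars.join ['\n'] ((pvPart pr).map String.toList)) ≠ [] := by
        simpa using hene
      rw [if_neg htail, List.map_cons, pvJoin_cons_ne _ _ _ hmapne]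
      simp only [String.toList_append, pvBlock_eq, ih (i + 1), pvLitNN]
      try simp [List.append_assoc]

theorem pvMainEq (title : String) (items : List (List (String × String))) (hni : items ≠ []) :
    PySem.Chars.strip (PySem.Chars.join ['\n']
      ((['#', '#', ' '] ++ title.toList) ::
        (PySem.List.enumerate items (1 : Int)).flatMap
          (fun pr => (pvPart pr).map String.toList ++ [[]])))
    = ['#', '#', ' '] ++ title.toList ++ ['\n'] ++
      PySem.Chars.join ['\n', '\n'] ((PySem.List.enumerate items (1 : Int)).map
        (fun pr => PySem.Chars.join ['\n'] ((pvPart pr).map String.toList))) := by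
  have hene : PySem.List.enumerate items (1 : Int) ≠ [] := by
    intro hcon
    have := PySem.List.length_enumerate items (1 : Int)
    rw [hcon] at this
    exact hni (List.eq_nil_of_length_eq_zero (by simpa using this.symm))
  have hcond : ∀ p ∈ (PySem.List.enumerate items (1 : Int)).map
      (fun pr => (pvPart pr).map String.toList), p ≠ [] ∧ ∀ l ∈ p, pvClean l := by
    intro p hp
    obtain ⟨pr, _, rfl⟩ := List.mem_map.mp hp
    refine ⟨by simp [pvPart_nonempty pr], ?_⟩
    intro l hl
    obtain ⟨x, hx, rfl⟩ := List.mem_map.mp hl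
    exact pvPart_clean pr x hx
  have hJF := pvJoin_flatten _ (by simpa using hene) hcond
  simp only [List.flatMap_map, List.map_map, Function.comp_def] at hJF
  have hflat_ne : (PySem.List.enumerate items (1 : Int)).flatMap
      (fun pr => (pvPart pr).map String.toList ++ [[]]) ≠ [] := by
    cases he : PySem.List.enumerate items (1 : Int) with
    | nil => exact absurd he hene
    | cons c cs =>
      simp only [List.flatMap_cons]
      intro hcon
      have := congrArg List.length hcon
      simp at this
  have hJclean : pvClean (PySem.Chars.join ['\n', '\n']
      ((PySem.List.enumerate items (1 : Int)).map
        (fun pr => PySem.Chars.join ['\n'] ((pvPart pr).map String.toList)))) := by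
    apply pvClean_join _ _ (by simpa using hene)
    intro b hb
    obtain ⟨pr, _, rfl⟩ := List.mem_map.mp hb
    apply pvClean_join _ _ (by simp [pvPart_nonempty pr])
    intro l hl
    obtain ⟨x, hx, rfl⟩ := List.mem_map.mp hl
    exact pvPart_clean pr x hx
  rw [pvJoin_cons_ne ['\n'] _ _ hflat_ne, hJF]
  set J := PySem.Chars.join ['\n', '\n'] ((PySem.List.enumerate items (1 : Int)).map
    (fun pr => PySem.Chars.join ['\n'] ((pvPart pr).map String.toList))) with hJdef
  have hshape : ['#', '#', ' '] ++ title.toList ++ ['\n'] ++ (J ++ ['\n'])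
      = ('#' :: ('#' :: ' ' :: title.toList ++ ['\n'] ++ J)) ++ ['\n'] := by simp
  rw [hshape, PySem.Chars.strip]
  have hl : PySem.Chars.lstrip (('#' :: ('#' :: ' ' :: title.toList ++ ['\n'] ++ J)) ++ ['\n'])
      = ('#' :: ('#' :: ' ' :: title.toList ++ ['\n'] ++ J)) ++ ['\n'] := by
    simp [PySem.Chars.lstrip, show PySem.Chars.isspace '#' = false from by decide]
  rw [hl, pvRstrip_concat_space _ '\n' (by decide)]
  have hshape2 : ('#' :: ('#' :: ' ' :: title.toList ++ ['\n'] ++ J))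
      = ('#' :: '#' :: ' ' :: title.toList ++ ['\n']) ++ J := by simp
  rw [hshape2, pvRstrip_append_clean _ _ hJclean]
  simp

-- ===== VERDICT (by name: the statement is the Claim_ definition above) =====
theorem format_context_block_py_spec : Claim_equal_format_context_block_py := by
  unfold Claim_equal_format_context_block_py
  intro title items _
  unfold Spec_format_context_block_py format_context_block_py format_context_block_py_alt
  by_cases hni : items = []
  · simp [hni]
  · simp only [if_neg hni, pvFoldA, List.nil_append]
    apply String.toList_inj.mp
    simp only [PySem.Str.toList_strip, PySem.Str.toList_join, String.toList_append,
      List.map_cons, List.map_append, List.map_flatMap, List.map_map, List.map_nil,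
      pvLitN, pvLitNN, pvLitE, pvLitH,
      Function.comp_def, List.singleton_append, pvGo_eq]
    exact pvMainEq title items hni
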